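-- pv_equiv track=rewrite | github.com/ArchebasovVl/Collega-bot | mem.py | choose_category
-- ===== SOURCE A (Python) =====
-- WEIGHTS: dict[str, int] = {
--     'стикер': 30,
--     'достижения': 5,
--     'жиза': 7,
--     'навязчивые_мысли': 5,
--     'планы': 8,
--     'вопросы': 3,
--     'настроение': 1,
--     'правила': 7,
--     'это_я': 3,
--     'информация': 3
-- }
--
-- def choose_category(seed: int) -> str:
--     seed = seed % sum(WEIGHTS.values())
--     right = 0
--     for category in WEIGHTS:
--         left = right
--         right += WEIGHTS[category]
--         if left <= seed < right:
--             return category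
-- ===== SOURCE B (Python) =====
-- from itertools import accumulate
-- from bisect import bisect_right
--
-- WEIGHTS: dict[str, int] = {
--     'стикер': 30,
--     'достижения': 5,
--     'жиза': 7,
--     'навязчивые_мысли': 5,
--     'планы': 8,
--     'вопросы': 3,
--     'настроение': 1,
--     'правила': 7,
--     'это_я': 3,
--     'информация': 3
-- }
--
-- _CATEGORIES = list(WEIGHTS)
-- _CUM = list(accumulate(WEIGHTS.values()))
-- _TOTAL = _CUM[-1]
--
-- def choose_category(seed: int) -> str:
--     return _CATEGORIES[bisect_right(_CUM, seed % _TOTAL)]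
-- ===== Notes on version B (the rewrite author's own statement) =====
-- stated objective: idiomatic
-- what changed: Replaces A's linear scan over dict entries with running interval bounds by a precomputed prefix-sum table of cumulative weights and a bisect_right binary-search lookup into the category list.
import Mathlib
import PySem

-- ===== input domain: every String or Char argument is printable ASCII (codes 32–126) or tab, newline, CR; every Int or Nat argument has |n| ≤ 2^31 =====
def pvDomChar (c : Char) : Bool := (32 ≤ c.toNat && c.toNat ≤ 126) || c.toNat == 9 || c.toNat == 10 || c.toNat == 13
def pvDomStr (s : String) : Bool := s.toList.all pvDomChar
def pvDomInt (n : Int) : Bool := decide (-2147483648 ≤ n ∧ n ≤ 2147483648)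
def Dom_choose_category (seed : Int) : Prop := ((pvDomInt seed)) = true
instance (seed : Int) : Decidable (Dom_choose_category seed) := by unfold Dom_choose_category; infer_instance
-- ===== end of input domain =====

-- B replaces A's linear interval scan with a prefix-sum table + bisect_right lookup (idiomatic; same result).

-- shared module-level constant WEIGHTS (dict → association list in insertion order)
def WEIGHTS : PySem.Dict String Int := PySem.Dict.ofList
  [("стикер", 30), ("достижения", 5), ("жиза", 7), ("навязчивые_мысли", 5),
   ("планы", 8), ("вопросы", 3), ("настроение", 1), ("правила", 7),
   ("это_я", 3), ("информация", 3)]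

-- ===== PORT A =====
-- the for-loop with early return: produces none only if no interval matched
-- (unreachable for 0 ≤ seed < total; the .getD "" below models the unreachable fall-through)
def chooseLoopA (seed : Int) : List String → Int → Option String
  | [], _ => none
  | c :: rest, right =>
    let left := right
    let right' := right + (PySem.Dict.getD WEIGHTS c 0)
    if left ≤ seed ∧ seed < right' then some c else chooseLoopA seed rest right'

def choose_category (seed : Int) : String :=
  let s := PySem.Int.mod seed ((PySem.Dict.values WEIGHTS).foldl (· + ·) 0)
  (chooseLoopA s (PySem.Dict.keys WEIGHTS) 0).getD ""

-- ===== PORT B =====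
def pvCategories : List String := PySem.Dict.keys WEIGHTS
-- itertools.accumulate over WEIGHTS.values()
def pvCum : List Int := ((PySem.Dict.values WEIGHTS).scanl (· + ·) 0).drop 1
def pvTotal : Int := (PySem.List.pyGet? pvCum (-1)).getD 0

def choose_category_alt (seed : Int) : String :=
  (PySem.List.pyGet? pvCategories
    (Int.ofNat (PySem.List.bisectRight pvCum (PySem.Int.mod seed pvTotal)))).getD ""

-- ===== PRECONDITION & SPEC =====
def Spec_choose_category (seed : Int) (out : String) : Prop := out = choose_category_alt seed
instance (seed : Int) (out : String) : Decidable (Spec_choose_category seed out) := by unfold Spec_choose_category; infer_instance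

-- ===== CLAIM (what is proved, stated in full; the proofs are below) =====
def Claim_equal_choose_category : Prop := ∀ (seed : Int), Dom_choose_category seed → Spec_choose_category seed (choose_category seed)

-- ===== LEMMAS AND PROOFS =====

-- both programs agree on every residue 0 ≤ n < 72 (total weight = 72); checked by the kernel
lemma choose_agree_on_residues :
    ∀ n : Nat, n < 72 →
      (chooseLoopA (n : Int) (PySem.Dict.keys WEIGHTS) 0).getD "" =
      (PySem.List.pyGet? pvCategories
        (Int.ofNat (PySem.List.bisectRight pvCum (n : Int)))).getD "" := by decide

lemma total_eq : (PySem.Dict.values WEIGHTS).foldl (· + ·) 0 = 72 := by decide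

lemma pvTotal_eq : pvTotal = 72 := by decide

-- ===== VERDICT (by name: the statement is the Claim_ definition above) =====
theorem choose_category_spec : Claim_equal_choose_category := by
  intro seed _
  unfold Spec_choose_category choose_category choose_category_alt
  rw [total_eq, pvTotal_eq]
  have h0 : (0:Int) < 72 := by norm_num
  have hnn := PySem.Int.mod_nonneg seed h0
  have hlt := PySem.Int.mod_lt seed h0
  set s := PySem.Int.mod seed 72 with hs
  have hsn : s = ((s.toNat : Nat) : Int) := (Int.toNat_of_nonneg hnn).symm
  have hlt' : s.toNat < 72 := by omega
  rw [hsn]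
  exact choose_agree_on_residues s.toNat hlt'
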